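-- pv_equiv track=rewrite | github.com/joazingue/DataScience_UnitI | DataWrangling/IO/PW_miniproject_exercises.py | get_max_item
-- ===== SOURCE A (Python) =====
-- def get_max_item(groups):
--     max_item = [('', 0)]
--     quant = 0
--     for item in groups.items():
--         for key in item[1]:
--             quant += key['items']
--         if quant > max_item[0][1]:
--             del max_item[0]
--             max_item.append((item[0], quant))
--         elif quant == max_item[0][1]:
--             if max_item[0][0] > item[0]:
--                 del max_item[0]
--                 max_item.append((item[0], quant))
--         quant = 0
--     return max_item
-- ===== SOURCE B (Python) =====
-- def get_max_item(groups):
--     table = [('', 0)] + [(k, sum(d['items'] for d in v)) for k, v in groups.items()]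
--     table.sort(key=lambda kv: (-kv[1], kv[0]))
--     return table[:1]
-- ===== Notes on version B (the rewrite author's own statement) =====
-- stated objective: alternative
-- what changed: A's running-best scan with a mutable one-element list and a quant accumulator is replaced by a sort-based selection: build a sentinel-prefixed (name, sum) table, fully sort it by (-sum, name), and return its first element.
import Mathlib
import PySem

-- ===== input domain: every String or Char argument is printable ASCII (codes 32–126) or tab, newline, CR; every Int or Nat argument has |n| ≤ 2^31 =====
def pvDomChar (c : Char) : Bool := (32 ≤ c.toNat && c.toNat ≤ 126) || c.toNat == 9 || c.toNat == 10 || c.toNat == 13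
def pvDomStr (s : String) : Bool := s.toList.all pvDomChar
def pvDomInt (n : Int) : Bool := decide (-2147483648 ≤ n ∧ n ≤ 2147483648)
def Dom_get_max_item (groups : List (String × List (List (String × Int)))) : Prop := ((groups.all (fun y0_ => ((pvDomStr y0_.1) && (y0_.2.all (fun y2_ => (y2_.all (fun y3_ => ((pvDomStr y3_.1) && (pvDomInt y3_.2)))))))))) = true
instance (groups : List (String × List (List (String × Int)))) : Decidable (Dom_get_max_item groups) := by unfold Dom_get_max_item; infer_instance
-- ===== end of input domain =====

-- B replaces A's running-best scan by a sort-based selection (sentinel-prefixed table sorted by (-sum, name), first element); no speed claim.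
-- key['items'] (dict lookup; KeyError excluded by Pre_); exact under that Pre_.
def pvItemsOf (d : List (String × Int)) : Int := PySem.Dict.getD (PySem.Dict.mk d) "items" 0

-- ===== PORT A =====
def get_max_item (groups : List (String × List (List (String × Int)))) : List (String × Int) :=
  (groups.foldl
    (fun (st : List (String × Int) × Int) item =>
      -- for key in item[1]: quant += key['items']
      let quant := item.2.foldl (fun q key => q + pvItemsOf key) st.2
      let m := PySem.List.pyGetD st.1 0 ("", 0)   -- max_item[0]
      let mi :=
        if quant > m.2 then st.1.eraseIdx 0 ++ [(item.1, quant)]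
        else if quant = m.2 ∧ m.1 > item.1 then st.1.eraseIdx 0 ++ [(item.1, quant)]
        else st.1
      (mi, 0))                                    -- quant = 0
    ([("", 0)], 0)).1

-- ===== PORT B =====
def get_max_item_alt (groups : List (String × List (List (String × Int)))) : List (String × Int) :=
  -- table = [('', 0)] + [(k, sum(d['items'] for d in v)) for k, v in groups.items()]
  let table : List (String × Int) := ("", 0) :: groups.map (fun kv => (kv.1, (kv.2.map pvItemsOf).sum))
  -- table.sort(key=lambda kv: (-kv[1], kv[0]))  — stable sort on the tuple key
  let sortedTable := PySem.List.sorted2 table (fun kv => -kv.2) (fun kv => kv.1)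
  -- return table[:1]
  PySem.List.slice sortedTable none (some 1)

-- ===== PRECONDITION & SPEC =====
-- Pre_ excludes exactly the inputs where some inner dict lacks the key 'items': there A (and B) raise KeyError.
def Pre_get_max_item (groups : List (String × List (List (String × Int)))) : Prop :=
  ∀ g ∈ groups, ∀ d ∈ g.2, (PySem.Dict.mk d).contains "items" = true
instance (groups : List (String × List (List (String × Int)))) : Decidable (Pre_get_max_item groups) := by unfold Pre_get_max_item; infer_instance
def pvWitness_get_max_item : (List (String × List (List (String × Int)))) :=
  [("a", [[("items", 2)], [("items", 1)]]), ("b", [[("items", 3)]])]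
def Spec_get_max_item (groups : List (String × List (List (String × Int)))) (out : List (String × Int)) : Prop := out = get_max_item_alt groups
instance (groups : List (String × List (List (String × Int)))) (out : List (String × Int)) : Decidable (Spec_get_max_item groups out) := by unfold Spec_get_max_item; infer_instance

-- ===== CLAIM (what is proved, stated in full; the proofs are below) =====
def Claim_equal_get_max_item : Prop := ∀ (groups : List (String × List (List (String × Int)))), Dom_get_max_item groups → Pre_get_max_item groups → Spec_get_max_item groups (get_max_item groups)

-- ===== LEMMAS AND PROOFS =====

-- the selection step both programs reduce to: keep the better of best-so-far m and candidate s
def pvPick (m s : String × Int) : String × Int :=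
  if s.2 > m.2 ∨ (s.2 = m.2 ∧ s.1 < m.1) then s else m

-- B's comparator (sorted2's 'before' for key (-sum, name)) picks exactly pvPick
def pvLt (a b : String × Int) : Bool :=
  decide (-a.2 < -b.2) || (!decide (-b.2 < -a.2) && decide (a.1 < b.1))

lemma pick_eq (m s : String × Int) : (if pvLt s m then s else m) = pvPick m s := by
  unfold pvLt pvPick
  rcases lt_trichotomy s.2 m.2 with h | h | h
  · have h1 : ¬(-s.2 < -m.2) := by omega
    have h2 : (-m.2 < -s.2) := by omega
    have h3 : ¬(s.2 > m.2 ∨ (s.2 = m.2 ∧ s.1 < m.1)) := by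
      rintro (hh | ⟨hh, _⟩) <;> omega
    have hb : (decide (-s.2 < -m.2) || (!decide (-m.2 < -s.2) && decide (s.1 < m.1))) = false := by
      simp [h1, h2]
    rw [hb, if_neg (by simp), if_neg h3]
  · have h1 : ¬(-s.2 < -m.2) := by omega
    have h2 : ¬(-m.2 < -s.2) := by omega
    by_cases h4 : s.1 < m.1
    · have hc : s.2 > m.2 ∨ (s.2 = m.2 ∧ s.1 < m.1) := Or.inr ⟨h, h4⟩
      have hb : (decide (-s.2 < -m.2) || (!decide (-m.2 < -s.2) && decide (s.1 < m.1))) = true := by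
        simp [h1, h2, h4]
      rw [hb, if_pos rfl, if_pos hc]
    · have hc : ¬(s.2 > m.2 ∨ (s.2 = m.2 ∧ s.1 < m.1)) := by
        rintro (hh | ⟨_, hh⟩)
        · omega
        · exact h4 hh
      have hb : (decide (-s.2 < -m.2) || (!decide (-m.2 < -s.2) && decide (s.1 < m.1))) = false := by
        simp [h1, h2, h4]
      rw [hb, if_neg (by simp), if_neg hc]
  · have hc : s.2 > m.2 ∨ (s.2 = m.2 ∧ s.1 < m.1) := Or.inl h
    have hb : (decide (-s.2 < -m.2) || (!decide (-m.2 < -s.2) && decide (s.1 < m.1))) = true := by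
      have h1 : (-s.2 < -m.2) := by omega
      simp [h1]
    rw [hb, if_pos rfl, if_pos hc]

-- the head of an insertBy-fold started at a nonempty list is the running minimum under 'before'
lemma foldl_insertBy_head (before : (String × Int) → (String × Int) → Bool) :
    ∀ (l : List (String × Int)) (h : String × Int) (t : List (String × Int)),
    ∃ r, l.foldl (fun acc x => PySem.List.insertBy before x acc) (h :: t)
         = (l.foldl (fun m s => if before s m then s else m) h) :: r := by
  intro l
  induction l with
  | nil => intro h t; exact ⟨t, rfl⟩
  | cons x xs ih =>
      intro h t
      simp only [List.foldl_cons]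
      have hins : PySem.List.insertBy before x (h :: t)
          = if before x h then x :: h :: t else h :: PySem.List.insertBy before x t := by
        simp [PySem.List.insertBy]
      rw [hins]
      by_cases hc : before x h = true
      · rw [if_pos hc, if_pos hc]; exact ih x (h :: t)
      · rw [if_neg hc, if_neg hc]; exact ih h (PySem.List.insertBy before x t)

-- A's loop, whose state is always ([m], 0), is the pvPick fold over the per-group sums
lemma foldA_eq (l : List (String × List (List (String × Int)))) (m : String × Int) :
    (l.foldl
      (fun (st : List (String × Int) × Int) item =>
        let quant := item.2.foldl (fun q key => q + pvItemsOf key) st.2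
        let m := PySem.List.pyGetD st.1 0 ("", 0)
        let mi :=
          if quant > m.2 then st.1.eraseIdx 0 ++ [(item.1, quant)]
          else if quant = m.2 ∧ m.1 > item.1 then st.1.eraseIdx 0 ++ [(item.1, quant)]
          else st.1
        (mi, 0))
      ([m], 0)).1
    = [(l.map (fun kv => (kv.1, (kv.2.map pvItemsOf).sum))).foldl pvPick m] := by
  induction l generalizing m with
  | nil => rfl
  | cons g t ih =>
      simp only [List.foldl_cons, List.map_cons]
      have hq : g.2.foldl (fun q key => q + pvItemsOf key) (0 : Int) = (g.2.map pvItemsOf).sum := by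
        rw [PySem.List.foldl_add]; ring
      simp only [PySem.List.pyGetD_zero_cons, hq]
      by_cases h1 : (g.2.map pvItemsOf).sum > m.2
      · rw [if_pos h1]
        have hp : pvPick m (g.1, (g.2.map pvItemsOf).sum) = (g.1, (g.2.map pvItemsOf).sum) := by
          simp [pvPick, h1]
        rw [hp]
        exact ih (g.1, (g.2.map pvItemsOf).sum)
      · rw [if_neg h1]
        by_cases h2 : (g.2.map pvItemsOf).sum = m.2 ∧ m.1 > g.1
        · rw [if_pos h2]
          have hp : pvPick m (g.1, (g.2.map pvItemsOf).sum) = (g.1, (g.2.map pvItemsOf).sum) := by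
            simp [pvPick, h2.1, h2.2]
          rw [hp]
          exact ih (g.1, (g.2.map pvItemsOf).sum)
        · rw [if_neg h2]
          have hp : pvPick m (g.1, (g.2.map pvItemsOf).sum) = m := by
            simp only [pvPick, ite_eq_right_iff]
            intro hc; exfalso
            rcases hc with h | h
            · exact h1 h
            · exact h2 ⟨h.1, h.2⟩
          rw [hp]
          exact ih m

-- B: first element of the sorted sentinel-prefixed table = the pvPick fold over the sums
lemma altB_eq (groups : List (String × List (List (String × Int)))) :
    get_max_item_alt groups
    = [(groups.map (fun kv => (kv.1, (kv.2.map pvItemsOf).sum))).foldl pvPick ("", 0)] := by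
  unfold get_max_item_alt
  dsimp only
  set sums := groups.map (fun kv => (kv.1, (kv.2.map pvItemsOf).sum)) with hsums
  have hsort : PySem.List.sorted2 (("", 0) :: sums) (fun kv => -kv.2) (fun kv => kv.1)
      = (("", 0) :: sums).foldl (fun acc x => PySem.List.insertBy pvLt x acc) [] := by
    rfl
  rw [hsort]
  simp only [List.foldl_cons]
  have hfirst : PySem.List.insertBy pvLt ("", 0) ([] : List (String × Int)) = [("", 0)] := rfl
  rw [hfirst]
  obtain ⟨r, hr⟩ := foldl_insertBy_head pvLt sums ("", 0) []
  rw [hr]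
  have hpick : sums.foldl (fun m s => if pvLt s m then s else m) ("", 0)
      = sums.foldl pvPick ("", 0) := by
    apply PySem.List.foldl_congr_mem
    intro acc x _
    exact pick_eq acc x
  rw [PySem.List.slice_to _ (by omega)]
  simp [hpick]

-- ===== VERDICT (by name: the statement is the Claim_ definition above) =====
theorem get_max_item_spec : Claim_equal_get_max_item := by
  intro groups _ _
  unfold Spec_get_max_item get_max_item
  rw [altB_eq, foldA_eq]
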